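-- pv_equiv track=rewrite | github.com/Deepakk681/kiwiq | services/workflow_service/services/scraping/technical_seo/technical_seo.py | _classify_from_types
-- ===== SOURCE A (Python) =====
-- from typing import Dict, List, Optional, Tuple, TYPE_CHECKING, Any, Set
--
-- def _classify_from_types(type_counts: Dict[str, int]) -> Dict[str, bool]:
--     tset = set(k for k, v in type_counts.items() if v > 0)
--     return {
--         'blog_like': any(t in tset for t in {'BlogPosting', 'Article', 'TechArticle'}),
--         'faq_like': ('FAQPage' in tset) or (('Question' in tset) and ('Answer' in tset)),
--         'product_like': any(t in tset for t in {'Product', 'Offer', 'AggregateRating', 'PriceSpecification'}),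
--         'software_like': any(t in tset for t in {'SoftwareApplication', 'WebApplication', 'APIReference', 'SoftwareSourceCode'}),
--         'organization_like': any(t in tset for t in {'Organization', 'Corporation'}),
--         'event_like': any(t.endswith('Event') for t in tset) or ('Event' in tset),
--         'course_like': any(t in tset for t in {'Course', 'LearningResource'}),
--         'has_breadcrumbs': 'BreadcrumbList' in tset,
--         'has_site_search': 'SearchAction' in tset,
--     }
-- ===== SOURCE B (Python) =====
-- # Single-pass, table-driven re-implementation: one scan over the counts with a
-- # static type->flag dispatch table, instead of nine membership queries on a set.
-- _TYPE_TO_FLAG = {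
--     'BlogPosting': 'blog_like', 'Article': 'blog_like', 'TechArticle': 'blog_like',
--     'Product': 'product_like', 'Offer': 'product_like',
--     'AggregateRating': 'product_like', 'PriceSpecification': 'product_like',
--     'SoftwareApplication': 'software_like', 'WebApplication': 'software_like',
--     'APIReference': 'software_like', 'SoftwareSourceCode': 'software_like',
--     'Organization': 'organization_like', 'Corporation': 'organization_like',
--     'Course': 'course_like', 'LearningResource': 'course_like',
--     'BreadcrumbList': 'has_breadcrumbs', 'SearchAction': 'has_site_search',
--     'Event': 'event_like',
-- }
--
-- _FLAG_ORDER = ('blog_like', 'faq_like', 'product_like', 'software_like',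
--                'organization_like', 'event_like', 'course_like',
--                'has_breadcrumbs', 'has_site_search')
--
--
-- def _classify_from_types(type_counts):
--     result = {name: False for name in _FLAG_ORDER}
--     saw_faqpage = saw_question = saw_answer = False
--     for k, v in type_counts.items():
--         if v <= 0:
--             continue
--         flag = _TYPE_TO_FLAG.get(k)
--         if flag is not None:
--             result[flag] = True
--         if k.endswith('Event'):
--             result['event_like'] = True
--         if k == 'FAQPage':
--             saw_faqpage = True
--         elif k == 'Question':
--             saw_question = True
--         elif k == 'Answer':
--             saw_answer = True
--     result['faq_like'] = saw_faqpage or (saw_question and saw_answer)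
--     return result
-- ===== Notes on version B (the rewrite author's own statement) =====
-- stated objective: alternative
-- what changed: Replaced the set-build plus nine independent membership/any queries with a single pass over the counts driven by a static type-to-flag dispatch table, accumulating all flags (and the FAQPage/Question/Answer sightings) in one loop.
import Mathlib
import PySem

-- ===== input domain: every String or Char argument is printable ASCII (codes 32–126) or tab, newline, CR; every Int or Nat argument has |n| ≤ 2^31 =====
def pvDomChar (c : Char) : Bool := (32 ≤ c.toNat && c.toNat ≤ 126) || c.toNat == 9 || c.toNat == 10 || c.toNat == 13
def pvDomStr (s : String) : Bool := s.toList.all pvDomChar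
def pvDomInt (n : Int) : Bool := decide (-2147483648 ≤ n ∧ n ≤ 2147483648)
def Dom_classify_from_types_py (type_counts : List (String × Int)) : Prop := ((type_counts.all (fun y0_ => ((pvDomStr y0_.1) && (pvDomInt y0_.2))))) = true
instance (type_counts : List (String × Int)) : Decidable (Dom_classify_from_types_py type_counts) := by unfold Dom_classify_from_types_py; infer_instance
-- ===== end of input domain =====

-- One honest line: B replaces A's set-build + nine membership queries by one
-- table-driven pass over the counts; same results, different decomposition.

-- ===== PORT A =====
-- A: tset = {k | count > 0}, then nine flags each by membership / any over tset.
-- (Python iterates literal sets and tset only under `any`, which is order-independent.)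
def classify_from_types_py (type_counts : List (String × Int)) : List (String × Bool) :=
  let tset : PySem.Set String :=
    PySem.Set.ofList (type_counts.filterMap (fun kv => if kv.2 > 0 then some kv.1 else none))
  [("blog_like", ["BlogPosting", "Article", "TechArticle"].any (fun t => PySem.Set.contains tset t)),
   ("faq_like", PySem.Set.contains tset "FAQPage" ||
      (PySem.Set.contains tset "Question" && PySem.Set.contains tset "Answer")),
   ("product_like", ["Product", "Offer", "AggregateRating", "PriceSpecification"].any
      (fun t => PySem.Set.contains tset t)),
   ("software_like", ["SoftwareApplication", "WebApplication", "APIReference", "SoftwareSourceCode"].any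
      (fun t => PySem.Set.contains tset t)),
   ("organization_like", ["Organization", "Corporation"].any (fun t => PySem.Set.contains tset t)),
   ("event_like", tset.any (fun t => PySem.Str.endswith t "Event") || PySem.Set.contains tset "Event"),
   ("course_like", ["Course", "LearningResource"].any (fun t => PySem.Set.contains tset t)),
   ("has_breadcrumbs", PySem.Set.contains tset "BreadcrumbList"),
   ("has_site_search", PySem.Set.contains tset "SearchAction")]

-- ===== PORT B =====
-- B: static dispatch table, one fold over the counts accumulating the result dict
-- and the three FAQ sightings; faq_like written after the loop.
def pvTypeToFlag : PySem.Dict String String :=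
  { items := [("BlogPosting", "blog_like"), ("Article", "blog_like"), ("TechArticle", "blog_like"),
    ("Product", "product_like"), ("Offer", "product_like"),
    ("AggregateRating", "product_like"), ("PriceSpecification", "product_like"),
    ("SoftwareApplication", "software_like"), ("WebApplication", "software_like"),
    ("APIReference", "software_like"), ("SoftwareSourceCode", "software_like"),
    ("Organization", "organization_like"), ("Corporation", "organization_like"),
    ("Course", "course_like"), ("LearningResource", "course_like"),
    ("BreadcrumbList", "has_breadcrumbs"), ("SearchAction", "has_site_search"),
    ("Event", "event_like")] }

def pvInitResult : PySem.Dict String Bool :=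
  { items := [("blog_like", false), ("faq_like", false), ("product_like", false),
    ("software_like", false), ("organization_like", false), ("event_like", false),
    ("course_like", false), ("has_breadcrumbs", false), ("has_site_search", false)] }

def pvStep (st : PySem.Dict String Bool × Bool × Bool × Bool) (kv : String × Int) :
    PySem.Dict String Bool × Bool × Bool × Bool :=
  if kv.2 ≤ 0 then st
  else
    let st1 :=
      match PySem.Dict.get? pvTypeToFlag kv.1 with
      | some f => (PySem.Dict.insert st.1 f true, st.2)
      | none => st
    let st2 :=
      if PySem.Str.endswith kv.1 "Event" then (PySem.Dict.insert st1.1 "event_like" true, st1.2)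
      else st1
    if kv.1 == "FAQPage" then (st2.1, true, st2.2.2.1, st2.2.2.2)
    else if kv.1 == "Question" then (st2.1, st2.2.1, true, st2.2.2.2)
    else if kv.1 == "Answer" then (st2.1, st2.2.1, st2.2.2.1, true)
    else st2

def classify_from_types_py_alt (type_counts : List (String × Int)) : List (String × Bool) :=
  let st := type_counts.foldl pvStep (pvInitResult, false, false, false)
  (PySem.Dict.insert st.1 "faq_like" (st.2.1 || (st.2.2.1 && st.2.2.2))).items

-- ===== PRECONDITION & SPEC =====
def Spec_classify_from_types_py (type_counts : List (String × Int)) (out : List (String × Bool)) : Prop := out = classify_from_types_py_alt type_counts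
instance (type_counts : List (String × Int)) (out : List (String × Bool)) : Decidable (Spec_classify_from_types_py type_counts out) := by unfold Spec_classify_from_types_py; infer_instance

-- ===== CLAIM (what is proved, stated in full; the proofs are below) =====
def Claim_equal_classify_from_types_py : Prop := ∀ (type_counts : List (String × Int)), Dom_classify_from_types_py type_counts → Spec_classify_from_types_py type_counts (classify_from_types_py type_counts)

-- ===== LEMMAS AND PROOFS =====

def pvMk (b1 b2 b3 b4 b5 b6 b7 b8 b9 : Bool) : PySem.Dict String Bool :=
  { items := [("blog_like", b1), ("faq_like", b2), ("product_like", b3),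
    ("software_like", b4), ("organization_like", b5), ("event_like", b6),
    ("course_like", b7), ("has_breadcrumbs", b8), ("has_site_search", b9)] }

def pvCBlog (k : String) : Bool := k == "BlogPosting" || k == "Article" || k == "TechArticle"
def pvCProd (k : String) : Bool := k == "Product" || k == "Offer" || k == "AggregateRating" || k == "PriceSpecification"
def pvCSoft (k : String) : Bool := k == "SoftwareApplication" || k == "WebApplication" || k == "APIReference" || k == "SoftwareSourceCode"
def pvCOrg (k : String) : Bool := k == "Organization" || k == "Corporation"
def pvCEvent (k : String) : Bool := k == "Event" || PySem.Str.endswith k "Event"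
def pvCCourse (k : String) : Bool := k == "Course" || k == "LearningResource"

def pvHit (l : List (String × Int)) (p : String → Bool) : Bool :=
  l.any (fun kv => decide (0 < kv.2) && p kv.1)
lemma pvContains (l : List (String × Int)) (x : String) :
    PySem.Set.contains
      (PySem.Set.ofList (l.filterMap (fun kv => if kv.2 > 0 then some kv.1 else none))) x
      = pvHit l (fun k => k == x) := by
  rw [Bool.eq_iff_iff]
  simp [PySem.Set.contains, PySem.Set.mem_ofList,
        List.mem_filterMap, pvHit, List.any_eq_true]
lemma pvAnySet (l : List (String × Int)) (p : String → Bool) :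
    (PySem.Set.ofList (l.filterMap (fun kv => if kv.2 > 0 then some kv.1 else none))).any p
      = pvHit l p := by
  rw [Bool.eq_iff_iff]
  simp only [List.any_eq_true, pvHit]
  constructor
  · rintro ⟨x, hx, hp⟩
    rw [show (x ∈ PySem.Set.ofList (l.filterMap (fun kv => if kv.2 > 0 then some kv.1 else none)))
        ↔ _ from PySem.Set.mem_ofList _ _, List.mem_filterMap] at hx
    obtain ⟨kv, hm, hc⟩ := hx
    by_cases hv : kv.2 > 0
    · simp only [if_pos hv, Option.some.injEq] at hc
      exact ⟨kv, hm, by simp [hv, hc, hp]⟩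
    · simp [if_neg hv] at hc
  · rintro ⟨kv, hm, h⟩
    simp only [Bool.and_eq_true, decide_eq_true_eq] at h
    refine ⟨kv.1, ?_, h.2⟩
    rw [show _ ↔ _ from PySem.Set.mem_ofList _ _, List.mem_filterMap]
    exact ⟨kv, hm, by simp [h.1]⟩
lemma pvHit_or (l : List (String × Int)) (p r : String → Bool) :
    (pvHit l p || pvHit l r) = pvHit l (fun k => p k || r k) := by
  rw [Bool.eq_iff_iff]
  simp only [Bool.or_eq_true, pvHit, List.any_eq_true, Bool.and_eq_true, decide_eq_true_eq]
  constructor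
  · rintro (⟨kv, hm, h1, h2⟩ | ⟨kv, hm, h1, h2⟩) <;> exact ⟨kv, hm, h1, by simp [h2]⟩
  · rintro ⟨kv, hm, h1, h2⟩
    cases hp : p kv.1 with
    | true => exact Or.inl ⟨kv, hm, h1, hp⟩
    | false => exact Or.inr ⟨kv, hm, h1, by simpa [hp] using h2⟩

lemma pvStep_mk (b1 b2 b3 b4 b5 b6 b7 b8 b9 f q a : Bool) (k : String) (v : Int) :
    pvStep (pvMk b1 b2 b3 b4 b5 b6 b7 b8 b9, f, q, a) (k, v) =
      (pvMk (b1 || (decide (0 < v) && pvCBlog k)) b2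
            (b3 || (decide (0 < v) && pvCProd k))
            (b4 || (decide (0 < v) && pvCSoft k))
            (b5 || (decide (0 < v) && pvCOrg k))
            (b6 || (decide (0 < v) && pvCEvent k))
            (b7 || (decide (0 < v) && pvCCourse k))
            (b8 || (decide (0 < v) && (k == "BreadcrumbList")))
            (b9 || (decide (0 < v) && (k == "SearchAction"))),
       f || (decide (0 < v) && (k == "FAQPage")),
       q || (decide (0 < v) && (k == "Question")),
       a || (decide (0 < v) && (k == "Answer"))) := by
  by_cases hv : v ≤ 0
  · simp [pvStep, hv, show ¬ (0:Int) < v by omega, pvMk]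
  · have h0 : (0:Int) < v := by omega
    simp only [pvStep, hv, if_false, h0, decide_true, Bool.true_and]
    by_cases h0 : k = "BlogPosting"
    · subst h0
      simp [pvMk, pvCBlog, pvCProd, pvCSoft, pvCOrg, pvCEvent, pvCCourse, PySem.Dict.insert, PySem.Dict.contains, PySem.Dict.get?, pvTypeToFlag,
        show PySem.Chars.endswith ['B', 'l', 'o', 'g', 'P', 'o', 's', 't', 'i', 'n', 'g'] ['E', 'v', 'e', 'n', 't'] = false from by decide]
    by_cases h1 : k = "Article"
    · subst h1
      simp [pvMk, pvCBlog, pvCProd, pvCSoft, pvCOrg, pvCEvent, pvCCourse, PySem.Dict.insert, PySem.Dict.contains, PySem.Dict.get?, pvTypeToFlag,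
        show PySem.Chars.endswith ['A', 'r', 't', 'i', 'c', 'l', 'e'] ['E', 'v', 'e', 'n', 't'] = false from by decide]
    by_cases h2 : k = "TechArticle"
    · subst h2
      simp [pvMk, pvCBlog, pvCProd, pvCSoft, pvCOrg, pvCEvent, pvCCourse, PySem.Dict.insert, PySem.Dict.contains, PySem.Dict.get?, pvTypeToFlag,
        show PySem.Chars.endswith ['T', 'e', 'c', 'h', 'A', 'r', 't', 'i', 'c', 'l', 'e'] ['E', 'v', 'e', 'n', 't'] = false from by decide]
    by_cases h3 : k = "Product"
    · subst h3
      simp [pvMk, pvCBlog, pvCProd, pvCSoft, pvCOrg, pvCEvent, pvCCourse, PySem.Dict.insert, PySem.Dict.contains, PySem.Dict.get?, pvTypeToFlag,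
        show PySem.Chars.endswith ['P', 'r', 'o', 'd', 'u', 'c', 't'] ['E', 'v', 'e', 'n', 't'] = false from by decide]
    by_cases h4 : k = "Offer"
    · subst h4
      simp [pvMk, pvCBlog, pvCProd, pvCSoft, pvCOrg, pvCEvent, pvCCourse, PySem.Dict.insert, PySem.Dict.contains, PySem.Dict.get?, pvTypeToFlag,
        show PySem.Chars.endswith ['O', 'f', 'f', 'e', 'r'] ['E', 'v', 'e', 'n', 't'] = false from by decide]
    by_cases h5 : k = "AggregateRating"
    · subst h5
      simp [pvMk, pvCBlog, pvCProd, pvCSoft, pvCOrg, pvCEvent, pvCCourse, PySem.Dict.insert, PySem.Dict.contains, PySem.Dict.get?, pvTypeToFlag,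
        show PySem.Chars.endswith ['A', 'g', 'g', 'r', 'e', 'g', 'a', 't', 'e', 'R', 'a', 't', 'i', 'n', 'g'] ['E', 'v', 'e', 'n', 't'] = false from by decide]
    by_cases h6 : k = "PriceSpecification"
    · subst h6
      simp [pvMk, pvCBlog, pvCProd, pvCSoft, pvCOrg, pvCEvent, pvCCourse, PySem.Dict.insert, PySem.Dict.contains, PySem.Dict.get?, pvTypeToFlag,
        show PySem.Chars.endswith ['P', 'r', 'i', 'c', 'e', 'S', 'p', 'e', 'c', 'i', 'f', 'i', 'c', 'a', 't', 'i', 'o', 'n'] ['E', 'v', 'e', 'n', 't'] = false from by decide]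
    by_cases h7 : k = "SoftwareApplication"
    · subst h7
      simp [pvMk, pvCBlog, pvCProd, pvCSoft, pvCOrg, pvCEvent, pvCCourse, PySem.Dict.insert, PySem.Dict.contains, PySem.Dict.get?, pvTypeToFlag,
        show PySem.Chars.endswith ['S', 'o', 'f', 't', 'w', 'a', 'r', 'e', 'A', 'p', 'p', 'l', 'i', 'c', 'a', 't', 'i', 'o', 'n'] ['E', 'v', 'e', 'n', 't'] = false from by decide]
    by_cases h8 : k = "WebApplication"
    · subst h8
      simp [pvMk, pvCBlog, pvCProd, pvCSoft, pvCOrg, pvCEvent, pvCCourse, PySem.Dict.insert, PySem.Dict.contains, PySem.Dict.get?, pvTypeToFlag,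
        show PySem.Chars.endswith ['W', 'e', 'b', 'A', 'p', 'p', 'l', 'i', 'c', 'a', 't', 'i', 'o', 'n'] ['E', 'v', 'e', 'n', 't'] = false from by decide]
    by_cases h9 : k = "APIReference"
    · subst h9
      simp [pvMk, pvCBlog, pvCProd, pvCSoft, pvCOrg, pvCEvent, pvCCourse, PySem.Dict.insert, PySem.Dict.contains, PySem.Dict.get?, pvTypeToFlag,
        show PySem.Chars.endswith ['A', 'P', 'I', 'R', 'e', 'f', 'e', 'r', 'e', 'n', 'c', 'e'] ['E', 'v', 'e', 'n', 't'] = false from by decide]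
    by_cases h10 : k = "SoftwareSourceCode"
    · subst h10
      simp [pvMk, pvCBlog, pvCProd, pvCSoft, pvCOrg, pvCEvent, pvCCourse, PySem.Dict.insert, PySem.Dict.contains, PySem.Dict.get?, pvTypeToFlag,
        show PySem.Chars.endswith ['S', 'o', 'f', 't', 'w', 'a', 'r', 'e', 'S', 'o', 'u', 'r', 'c', 'e', 'C', 'o', 'd', 'e'] ['E', 'v', 'e', 'n', 't'] = false from by decide]
    by_cases h11 : k = "Organization"
    · subst h11
      simp [pvMk, pvCBlog, pvCProd, pvCSoft, pvCOrg, pvCEvent, pvCCourse, PySem.Dict.insert, PySem.Dict.contains, PySem.Dict.get?, pvTypeToFlag,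
        show PySem.Chars.endswith ['O', 'r', 'g', 'a', 'n', 'i', 'z', 'a', 't', 'i', 'o', 'n'] ['E', 'v', 'e', 'n', 't'] = false from by decide]
    by_cases h12 : k = "Corporation"
    · subst h12
      simp [pvMk, pvCBlog, pvCProd, pvCSoft, pvCOrg, pvCEvent, pvCCourse, PySem.Dict.insert, PySem.Dict.contains, PySem.Dict.get?, pvTypeToFlag,
        show PySem.Chars.endswith ['C', 'o', 'r', 'p', 'o', 'r', 'a', 't', 'i', 'o', 'n'] ['E', 'v', 'e', 'n', 't'] = false from by decide]
    by_cases h13 : k = "Course"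
    · subst h13
      simp [pvMk, pvCBlog, pvCProd, pvCSoft, pvCOrg, pvCEvent, pvCCourse, PySem.Dict.insert, PySem.Dict.contains, PySem.Dict.get?, pvTypeToFlag,
        show PySem.Chars.endswith ['C', 'o', 'u', 'r', 's', 'e'] ['E', 'v', 'e', 'n', 't'] = false from by decide]
    by_cases h14 : k = "LearningResource"
    · subst h14
      simp [pvMk, pvCBlog, pvCProd, pvCSoft, pvCOrg, pvCEvent, pvCCourse, PySem.Dict.insert, PySem.Dict.contains, PySem.Dict.get?, pvTypeToFlag,
        show PySem.Chars.endswith ['L', 'e', 'a', 'r', 'n', 'i', 'n', 'g', 'R', 'e', 's', 'o', 'u', 'r', 'c', 'e'] ['E', 'v', 'e', 'n', 't'] = false from by decide]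
    by_cases h15 : k = "BreadcrumbList"
    · subst h15
      simp [pvMk, pvCBlog, pvCProd, pvCSoft, pvCOrg, pvCEvent, pvCCourse, PySem.Dict.insert, PySem.Dict.contains, PySem.Dict.get?, pvTypeToFlag,
        show PySem.Chars.endswith ['B', 'r', 'e', 'a', 'd', 'c', 'r', 'u', 'm', 'b', 'L', 'i', 's', 't'] ['E', 'v', 'e', 'n', 't'] = false from by decide]
    by_cases h16 : k = "SearchAction"
    · subst h16
      simp [pvMk, pvCBlog, pvCProd, pvCSoft, pvCOrg, pvCEvent, pvCCourse, PySem.Dict.insert, PySem.Dict.contains, PySem.Dict.get?, pvTypeToFlag,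
        show PySem.Chars.endswith ['S', 'e', 'a', 'r', 'c', 'h', 'A', 'c', 't', 'i', 'o', 'n'] ['E', 'v', 'e', 'n', 't'] = false from by decide]
    by_cases h17 : k = "Event"
    · subst h17
      simp [pvMk, pvCBlog, pvCProd, pvCSoft, pvCOrg, pvCEvent, pvCCourse, PySem.Dict.insert, PySem.Dict.contains, PySem.Dict.get?, pvTypeToFlag,
        show PySem.Chars.endswith ['E', 'v', 'e', 'n', 't'] ['E', 'v', 'e', 'n', 't'] = true from by decide]
    by_cases h18 : k = "FAQPage"
    · subst h18
      simp [pvMk, pvCBlog, pvCProd, pvCSoft, pvCOrg, pvCEvent, pvCCourse, PySem.Dict.insert, PySem.Dict.contains, PySem.Dict.get?, pvTypeToFlag,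
        show PySem.Chars.endswith ['F', 'A', 'Q', 'P', 'a', 'g', 'e'] ['E', 'v', 'e', 'n', 't'] = false from by decide]
    by_cases h19 : k = "Question"
    · subst h19
      simp [pvMk, pvCBlog, pvCProd, pvCSoft, pvCOrg, pvCEvent, pvCCourse, PySem.Dict.insert, PySem.Dict.contains, PySem.Dict.get?, pvTypeToFlag,
        show PySem.Chars.endswith ['Q', 'u', 'e', 's', 't', 'i', 'o', 'n'] ['E', 'v', 'e', 'n', 't'] = false from by decide]
    by_cases h20 : k = "Answer"
    · subst h20
      simp [pvMk, pvCBlog, pvCProd, pvCSoft, pvCOrg, pvCEvent, pvCCourse, PySem.Dict.insert, PySem.Dict.contains, PySem.Dict.get?, pvTypeToFlag,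
        show PySem.Chars.endswith ['A', 'n', 's', 'w', 'e', 'r'] ['E', 'v', 'e', 'n', 't'] = false from by decide]
    have e0 : ("BlogPosting" == k) = false := by rw [beq_eq_false_iff_ne]; exact fun hh => h0 hh.symm
    have e1 : ("Article" == k) = false := by rw [beq_eq_false_iff_ne]; exact fun hh => h1 hh.symm
    have e2 : ("TechArticle" == k) = false := by rw [beq_eq_false_iff_ne]; exact fun hh => h2 hh.symm
    have e3 : ("Product" == k) = false := by rw [beq_eq_false_iff_ne]; exact fun hh => h3 hh.symm
    have e4 : ("Offer" == k) = false := by rw [beq_eq_false_iff_ne]; exact fun hh => h4 hh.symm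
    have e5 : ("AggregateRating" == k) = false := by rw [beq_eq_false_iff_ne]; exact fun hh => h5 hh.symm
    have e6 : ("PriceSpecification" == k) = false := by rw [beq_eq_false_iff_ne]; exact fun hh => h6 hh.symm
    have e7 : ("SoftwareApplication" == k) = false := by rw [beq_eq_false_iff_ne]; exact fun hh => h7 hh.symm
    have e8 : ("WebApplication" == k) = false := by rw [beq_eq_false_iff_ne]; exact fun hh => h8 hh.symm
    have e9 : ("APIReference" == k) = false := by rw [beq_eq_false_iff_ne]; exact fun hh => h9 hh.symm
    have e10 : ("SoftwareSourceCode" == k) = false := by rw [beq_eq_false_iff_ne]; exact fun hh => h10 hh.symm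
    have e11 : ("Organization" == k) = false := by rw [beq_eq_false_iff_ne]; exact fun hh => h11 hh.symm
    have e12 : ("Corporation" == k) = false := by rw [beq_eq_false_iff_ne]; exact fun hh => h12 hh.symm
    have e13 : ("Course" == k) = false := by rw [beq_eq_false_iff_ne]; exact fun hh => h13 hh.symm
    have e14 : ("LearningResource" == k) = false := by rw [beq_eq_false_iff_ne]; exact fun hh => h14 hh.symm
    have e15 : ("BreadcrumbList" == k) = false := by rw [beq_eq_false_iff_ne]; exact fun hh => h15 hh.symm
    have e16 : ("SearchAction" == k) = false := by rw [beq_eq_false_iff_ne]; exact fun hh => h16 hh.symm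
    have e17 : ("Event" == k) = false := by rw [beq_eq_false_iff_ne]; exact fun hh => h17 hh.symm
    by_cases he : PySem.Str.endswith k "Event"
    · have he' : PySem.Chars.endswith k.toList ['E','v','e','n','t'] = true := by simpa using he
      simp [pvMk, pvCBlog, pvCProd, pvCSoft, pvCOrg, pvCEvent, pvCCourse, PySem.Dict.insert, PySem.Dict.contains, PySem.Dict.get?, pvTypeToFlag, he', beq_iff_eq, *]
    · have he' : PySem.Chars.endswith k.toList ['E','v','e','n','t'] = false := by simpa using he
      simp [pvMk, pvCBlog, pvCProd, pvCSoft, pvCOrg, pvCEvent, pvCCourse, PySem.Dict.insert, PySem.Dict.contains, PySem.Dict.get?, pvTypeToFlag, he', beq_iff_eq, *]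

lemma pvLoop (l : List (String × Int)) (b1 b2 b3 b4 b5 b6 b7 b8 b9 f q a : Bool) :
    l.foldl pvStep (pvMk b1 b2 b3 b4 b5 b6 b7 b8 b9, f, q, a) =
      (pvMk (b1 || pvHit l pvCBlog) b2 (b3 || pvHit l pvCProd) (b4 || pvHit l pvCSoft)
            (b5 || pvHit l pvCOrg) (b6 || pvHit l pvCEvent) (b7 || pvHit l pvCCourse)
            (b8 || pvHit l (fun k => k == "BreadcrumbList"))
            (b9 || pvHit l (fun k => k == "SearchAction")),
       f || pvHit l (fun k => k == "FAQPage"),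
       q || pvHit l (fun k => k == "Question"),
       a || pvHit l (fun k => k == "Answer")) := by
  induction l generalizing b1 b2 b3 b4 b5 b6 b7 b8 b9 f q a with
  | nil => simp [pvHit]
  | cons kv t ih =>
    obtain ⟨k, v⟩ := kv
    rw [List.foldl_cons, pvStep_mk, ih]
    simp [pvHit, Bool.or_assoc]


lemma pvInsertFaq (b1 b2 b3 b4 b5 b6 b7 b8 b9 x : Bool) :
    (pvMk b1 b2 b3 b4 b5 b6 b7 b8 b9).insert "faq_like" x = pvMk b1 x b3 b4 b5 b6 b7 b8 b9 := by
  simp [PySem.Dict.insert, PySem.Dict.contains, pvMk]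


-- ===== VERDICT (by name: the statement is the Claim_ definition above) =====
theorem classify_from_types_py_spec : Claim_equal_classify_from_types_py := by
  intro l _
  unfold Spec_classify_from_types_py classify_from_types_py classify_from_types_py_alt
  rw [show pvInitResult = pvMk false false false false false false false false false from rfl, pvLoop]
  simp only [Bool.false_or]
  rw [pvInsertFaq]
  simp only [pvMk, List.any_cons, List.any_nil, Bool.or_false, pvAnySet, pvContains, pvHit_or]
  have hev : ∀ k, (PySem.Str.endswith k "Event" || (k == "Event")) = pvCEvent k := by
    intro k; simp [pvCEvent, Bool.or_comm]
  have hblog : ∀ k : String, (k == "BlogPosting" || (k == "Article" || k == "TechArticle")) = pvCBlog k := by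
    intro k; simp [pvCBlog, Bool.or_assoc]
  have hprod : ∀ k : String, (k == "Product" || (k == "Offer" || (k == "AggregateRating" || k == "PriceSpecification"))) = pvCProd k := by
    intro k; simp [pvCProd, Bool.or_assoc]
  have hsoft : ∀ k : String, (k == "SoftwareApplication" || (k == "WebApplication" || (k == "APIReference" || k == "SoftwareSourceCode"))) = pvCSoft k := by
    intro k; simp [pvCSoft, Bool.or_assoc]
  have horg : ∀ k : String, (k == "Organization" || k == "Corporation") = pvCOrg k := by
    intro k; simp [pvCOrg]
  have hcourse : ∀ k : String, (k == "Course" || k == "LearningResource") = pvCCourse k := by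
    intro k; simp [pvCCourse]
  simp only [hev, hblog, hprod, hsoft, horg, hcourse]
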